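-- pv_equiv track=rewrite | github.com/DemidGerasim/python | 9/9.1.py | generate_access_templates
-- ===== SOURCE A (Python) =====
-- def generate_access_templates(access):
--     lists = [] # создали пустой список
--     access_template = ['switchport mode access',
--                    'switchport access vlan',
--                    'switchport nonegotiate',
--                    'spanning-tree portfast',
--                    'spanning-tree bpduguard enable']
--     for inter, vlan in access.items(): # перебираем словрь и закидываем в переменные ключ: значение
--         lists.append('interface {}'.format(inter))
--         for template in access_template: # Пробегаемся по шаблону
--             if template.endswith('access vlan'):  # Если заканчивается на vlan
--                 lists.append(template + ' {}'.format(vlan)) # то в строке добавляем значение словаря access_config,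
--                 #то есть номер влана
--             else:
--                 lists.append(template)
--     return lists
-- ===== SOURCE B (Python) =====
-- def generate_access_templates(access):
--     result = []
--     for inter, vlan in access.items():
--         result.append('interface {}'.format(inter))
--         result.extend(['switchport mode access',
--                        'switchport access vlan {}'.format(vlan),
--                        'switchport nonegotiate',
--                        'spanning-tree portfast',
--                        'spanning-tree bpduguard enable'])
--     return result
-- ===== Notes on version B (the rewrite author's own statement) =====
-- stated objective: simpler
-- what changed: B drops the inner template loop and the endswith test, emitting each 6-line interface block as one literal list with the VLAN line pre-formatted.
import Mathlib
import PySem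

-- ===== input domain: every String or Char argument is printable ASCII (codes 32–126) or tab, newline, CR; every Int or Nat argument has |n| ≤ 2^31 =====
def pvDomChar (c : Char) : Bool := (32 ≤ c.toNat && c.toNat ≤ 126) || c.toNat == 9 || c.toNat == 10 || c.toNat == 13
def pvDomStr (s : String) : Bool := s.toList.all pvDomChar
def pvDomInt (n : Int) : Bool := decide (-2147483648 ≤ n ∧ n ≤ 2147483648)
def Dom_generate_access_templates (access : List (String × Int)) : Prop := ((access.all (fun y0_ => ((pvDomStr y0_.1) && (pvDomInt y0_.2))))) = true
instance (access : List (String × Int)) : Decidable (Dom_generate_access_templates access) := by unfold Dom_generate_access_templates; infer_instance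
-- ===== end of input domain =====

-- B emits each 6-line interface block as one literal list (VLAN line pre-formatted), dropping A's inner template loop and endswith test; objective: simpler.


-- ===== PORT A =====
def accessTemplateA : List String :=
  ["switchport mode access",
   "switchport access vlan",
   "switchport nonegotiate",
   "spanning-tree portfast",
   "spanning-tree bpduguard enable"]

def generate_access_templates (access : List (String × Int)) : List String :=
  access.foldl (fun lists iv =>
    let lists := lists ++ ["interface " ++ iv.1]
    accessTemplateA.foldl (fun lists template =>
      if PySem.Str.endswith template "access vlan" then
        lists ++ [template ++ " " ++ PySem.Int.toStr iv.2]
      else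
        lists ++ [template]) lists) []

-- ===== PORT B =====
def generate_access_templates_alt (access : List (String × Int)) : List String :=
  access.flatMap (fun iv =>
    ["interface " ++ iv.1,
     "switchport mode access",
     "switchport access vlan " ++ PySem.Int.toStr iv.2,
     "switchport nonegotiate",
     "spanning-tree portfast",
     "spanning-tree bpduguard enable"])

-- ===== PRECONDITION & SPEC =====
def Spec_generate_access_templates (access : List (String × Int)) (out : List String) : Prop := out = generate_access_templates_alt access
instance (access : List (String × Int)) (out : List String) : Decidable (Spec_generate_access_templates access out) := by unfold Spec_generate_access_templates; infer_instance

-- ===== CLAIM (what is proved, stated in full; the proofs are below) =====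
def Claim_equal_generate_access_templates : Prop := ∀ (access : List (String × Int)), Dom_generate_access_templates access → Spec_generate_access_templates access (generate_access_templates access)

-- ===== LEMMAS AND PROOFS =====
lemma gat_block (acc : List String) (iv : String × Int) :
    accessTemplateA.foldl (fun lists template =>
      if PySem.Str.endswith template "access vlan" then
        lists ++ [template ++ " " ++ PySem.Int.toStr iv.2]
      else
        lists ++ [template]) (acc ++ ["interface " ++ iv.1]) =
    acc ++ ["interface " ++ iv.1,
            "switchport mode access",
            "switchport access vlan " ++ PySem.Int.toStr iv.2,
            "switchport nonegotiate",
            "spanning-tree portfast",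
            "spanning-tree bpduguard enable"] := by
  simp only [accessTemplateA, List.foldl,
    show PySem.Str.endswith "switchport mode access" "access vlan" = false from by decide,
    show PySem.Str.endswith "switchport access vlan" "access vlan" = true from by decide,
    show PySem.Str.endswith "switchport nonegotiate" "access vlan" = false from by decide,
    show PySem.Str.endswith "spanning-tree portfast" "access vlan" = false from by decide,
    show PySem.Str.endswith "spanning-tree bpduguard enable" "access vlan" = false from by decide,
    Bool.false_eq_true, if_true, if_false, List.append_assoc]
  rfl

lemma gat_foldl (access : List (String × Int)) (acc : List String) :
    access.foldl (fun lists iv =>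
      let lists := lists ++ ["interface " ++ iv.1]
      accessTemplateA.foldl (fun lists template =>
        if PySem.Str.endswith template "access vlan" then
          lists ++ [template ++ " " ++ PySem.Int.toStr iv.2]
        else
          lists ++ [template]) lists) acc =
    acc ++ generate_access_templates_alt access := by
  induction access generalizing acc with
  | nil => simp [generate_access_templates_alt]
  | cons iv rest ih =>
    simp only [List.foldl_cons]
    rw [gat_block, ih]
    simp [generate_access_templates_alt]

-- ===== VERDICT (by name: the statement is the Claim_ definition above) =====
theorem generate_access_templates_spec : Claim_equal_generate_access_templates := by
  intro access _
  unfold Spec_generate_access_templates generate_access_templates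
  simpa using gat_foldl access []
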